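-- pv_equiv track=rewrite | github.com/daniel-reich/turbo-robot | 9CdF5hA7jRARpBwcF_7.py | map_letters
-- ===== SOURCE A (Python) =====
-- def map_letters(word):
--     if word=='':return {}
--     s = list(set(list(word)))
--     s.sort(key=lambda x:word.index(x))
--     res = []
--     obj={}
--     for char in s:
--         for i,match in enumerate(word):
--             if char==match:
--                 res.append(i)
--         obj[char] = res
--         res =[]
--     return obj
-- ===== SOURCE B (Python) =====
-- def map_letters(word):
--     obj = {}
--     for i, ch in enumerate(word):
--         obj.setdefault(ch, []).append(i)
--     return obj
-- ===== Notes on version B (the rewrite author's own statement) =====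
-- stated objective: faster
-- what changed: Replaces the set+sort-by-first-index plus a full rescan of the word per distinct character with a single pass that appends each index to a dict entry created at first occurrence.
import Mathlib
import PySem

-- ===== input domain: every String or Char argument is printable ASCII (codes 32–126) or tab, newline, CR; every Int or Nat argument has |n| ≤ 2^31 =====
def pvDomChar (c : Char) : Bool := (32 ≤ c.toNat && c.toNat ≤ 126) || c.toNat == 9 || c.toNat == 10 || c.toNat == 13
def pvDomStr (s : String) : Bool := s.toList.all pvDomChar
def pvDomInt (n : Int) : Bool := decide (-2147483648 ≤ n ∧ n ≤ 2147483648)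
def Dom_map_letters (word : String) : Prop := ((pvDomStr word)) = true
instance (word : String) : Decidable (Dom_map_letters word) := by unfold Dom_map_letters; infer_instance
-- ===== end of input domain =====

-- B replaces A's set+sort-by-first-index and per-distinct-character rescan of the word by a
-- single left-to-right pass that appends each index to the dict entry of its character (faster).

-- ===== PORT A =====
def map_letters (word : String) : List (String × List Int) :=
  if word = "" then []
  else
    -- s = list(set(list(word))); s.sort(key=lambda x: word.index(x))
    let s := PySem.List.sorted (PySem.Set.ofList word.toList)
      (fun x => (PySem.List.index? word.toList x).getD 0)
    -- for char in s: inner loop collects res, then obj[char] = res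
    (s.foldl (fun obj char =>
        obj.insert (String.ofList [char])
          ((PySem.List.enumerate word.toList 0).foldl
            (fun res p => if char == p.2 then res ++ [p.1] else res) []))
      PySem.Dict.empty).items

-- ===== PORT B =====
def map_letters_alt (word : String) : List (String × List Int) :=
  -- for i, ch in enumerate(word): obj.setdefault(ch, []).append(i)
  ((PySem.List.enumerate word.toList 0).foldl
      (fun obj p => obj.modify (String.ofList [p.2]) [] (fun v => v ++ [p.1]))
      PySem.Dict.empty).items

-- ===== PRECONDITION & SPEC =====
def Spec_map_letters (word : String) (out : List (String × List Int)) : Prop := out = map_letters_alt word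
instance (word : String) (out : List (String × List Int)) : Decidable (Spec_map_letters word out) := by unfold Spec_map_letters; infer_instance

-- ===== CLAIM (what is proved, stated in full; the proofs are below) =====
def Claim_equal_map_letters : Prop := ∀ (word : String), Dom_map_letters word → Spec_map_letters word (map_letters word)

-- ===== LEMMAS AND PROOFS =====

-- one-character strings are injective in their character
theorem single_injective : Function.Injective (fun c : Char => String.ofList [c]) := by
  intro a b h
  simpa using congrArg String.toList h

theorem idxOf?_of_mem {α : Type} [BEq α] [LawfulBEq α] (a : α) (l : List α) (h : a ∈ l) :
    List.idxOf? a l = some (l.idxOf a) := by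
  induction l with
  | nil => cases h
  | cons x xs ih =>
    by_cases hx : x = a
    · subst hx; simp [List.idxOf?_cons]
    · have hne : (x == a) = false := beq_false_of_ne hx
      rcases List.mem_cons.mp h with h' | h'
      · exact absurd h'.symm hx
      · simp [List.idxOf?_cons, List.idxOf_cons, hne, ih h']

-- the first-occurrence dedup of l is strictly increasing under idxOf in l
theorem ofList_pairwise_idxOf {α : Type} [BEq α] [LawfulBEq α] (l : List α) :
    (PySem.Set.ofList l).Pairwise (fun a b => l.idxOf a < l.idxOf b) := by
  induction l with
  | nil => simp [PySem.Set.ofList_nil]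
  | cons x xs ih =>
    rw [PySem.Set.ofList_cons]
    constructor
    · intro b hb
      have hbx : b ≠ x := by
        have := List.of_mem_filter hb
        simpa using this
      rw [List.idxOf_cons_self, List.idxOf_cons_ne _ (Ne.symm hbx)]
      exact Nat.succ_pos _
    · have hsub : (PySem.Set.discard (PySem.Set.ofList xs) x).Sublist (PySem.Set.ofList xs) :=
        List.filter_sublist
      have hpw := List.Pairwise.sublist hsub ih
      refine hpw.imp_of_mem ?_
      intro a b ha hb hab
      have hax : a ≠ x := by have := List.of_mem_filter ha; simpa using this
      have hbx : b ≠ x := by have := List.of_mem_filter hb; simpa using this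
      rw [List.idxOf_cons_ne _ (Ne.symm hax), List.idxOf_cons_ne _ (Ne.symm hbx)]
      exact Nat.succ_lt_succ hab

-- the sort by word.index leaves the first-occurrence dedup unchanged
theorem sorted_ofList_index (l : List Char) :
    PySem.List.sorted (PySem.Set.ofList l)
      (fun x => (PySem.List.index? l x).getD 0) = PySem.Set.ofList l := by
  apply PySem.List.sorted_eq_of_perm_of_pairwise_lt _ _ _ (List.Perm.refl _)
  refine (ofList_pairwise_idxOf l).imp_of_mem ?_
  intro a b ha hb hab
  have ha' : a ∈ l := (PySem.Set.mem_ofList l a).mp ha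
  have hb' : b ∈ l := (PySem.Set.mem_ofList l b).mp hb
  simpa [PySem.List.index?_eq_idxOf?, idxOf?_of_mem _ _ ha', idxOf?_of_mem _ _ hb'] using hab

-- first-occurrence dedup commutes with an injective map
theorem ofList_map_inj {α β : Type} [BEq α] [LawfulBEq α] [BEq β] [LawfulBEq β]
    (f : α → β) (hf : Function.Injective f) (l : List α) :
    PySem.Set.ofList (l.map f) = (PySem.Set.ofList l).map f := by
  induction l with
  | nil => simp [PySem.Set.ofList_nil]
  | cons x xs ih =>
    rw [List.map_cons, PySem.Set.ofList_cons, PySem.Set.ofList_cons, ih, List.map_cons]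
    congr 1
    unfold PySem.Set.discard
    rw [List.filter_map]
    congr 1
    apply List.filter_congr
    intro a _
    simp [Function.comp, hf.eq_iff]

-- A's items: one pair per distinct character, in first-occurrence order
theorem mapA_items (l : List Char) :
    ((PySem.Set.ofList l).foldl (fun obj char =>
        obj.insert (String.ofList [char])
          ((PySem.List.enumerate l 0).foldl
            (fun res p => if char == p.2 then res ++ [p.1] else res) []))
      PySem.Dict.empty).items
    = (PySem.Set.ofList l).map (fun c => (String.ofList [c],
        ((PySem.List.enumerate l 0).filter (fun p => p.2 == c)).map (fun p => p.1))) := by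
  rw [PySem.Dict.items_foldl_insert_fresh (PySem.Set.ofList l)
        (fun c => String.ofList [c]) _ PySem.Dict.empty
        (by intro a _; simp [PySem.Dict.contains_empty])
        ((PySem.Set.nodup_ofList l).map single_injective)]
  simp only [PySem.Dict.empty, List.nil_append]
  apply List.map_congr_left
  intro c _
  have hfa := PySem.List.foldl_append_if (fun p : Int × Char => c == p.2)
    (fun p : Int × Char => p.1) (PySem.List.enumerate l 0) []
  rw [hfa]
  simp only [List.nil_append]
  congr 1
  congr 1
  apply List.filter_congr
  intro p _
  simp [eq_comm]

-- B's dict is the same fold over key/value pairs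
theorem mapB_fold (l : List Char) :
    (PySem.List.enumerate l 0).foldl
      (fun obj p => obj.modify (String.ofList [p.2]) [] (fun v => v ++ [p.1]))
      (PySem.Dict.empty : PySem.Dict String (List Int))
    = ((PySem.List.enumerate l 0).map (fun p => (String.ofList [p.2], p.1))).foldl
        (fun obj q => obj.modify q.1 [] (fun v => v ++ [q.2])) PySem.Dict.empty := by
  rw [List.foldl_map]

theorem mapB_items (l : List Char) :
    ((PySem.List.enumerate l 0).foldl
      (fun obj p => obj.modify (String.ofList [p.2]) [] (fun v => v ++ [p.1]))
      (PySem.Dict.empty : PySem.Dict String (List Int))).items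
    = (PySem.Set.ofList l).map (fun c => (String.ofList [c],
        ((PySem.List.enumerate l 0).filter (fun p => p.2 == c)).map (fun p => p.1))) := by
  rw [mapB_fold]
  set L := (PySem.List.enumerate l 0).map (fun p => (String.ofList [p.2], p.1)) with hL
  have hkeys : (L.foldl (fun obj q => obj.modify q.1 [] (fun v => v ++ [q.2]))
      (PySem.Dict.empty : PySem.Dict String (List Int))).keys
      = (PySem.Set.ofList l).map (fun c => String.ofList [c]) := by
    rw [PySem.Dict.keys_foldl_modify_key L (fun q => q.1) [] (fun _ q v => v ++ [q.2])]
    rw [PySem.Dict.keys_empty, PySem.Set.update_nil_left]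
    rw [hL, List.map_map]
    have : ((fun q : String × Int => q.1) ∘ fun p : Int × Char => (String.ofList [p.2], p.1))
        = (fun c : Char => String.ofList [c]) ∘ (fun p : Int × Char => p.2) := rfl
    rw [this, ← List.map_map, PySem.List.map_snd_enumerate]
    exact ofList_map_inj _ single_injective l
  have hnd : (L.foldl (fun obj q => obj.modify q.1 [] (fun v => v ++ [q.2]))
      (PySem.Dict.empty : PySem.Dict String (List Int))).keys.Nodup := by
    apply PySem.Dict.nodup_keys_foldl_modify_key L (fun q => q.1) [] (fun _ q v => v ++ [q.2])
    exact PySem.Dict.nodup_keys_empty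
  rw [PySem.Dict.items_eq_map_keys _ hnd [], hkeys, List.map_map]
  apply List.map_congr_left
  intro c _
  simp only [Function.comp]
  congr 1
  rw [PySem.Dict.getD_foldl_modify_append L PySem.Dict.empty (String.ofList [c])]
  rw [PySem.Dict.getD_empty, List.nil_append, hL, List.filter_map, List.map_map]
  have hmaps : ((fun x : String × Int => x.2) ∘ fun p : Int × Char => (String.ofList [p.2], p.1))
      = (fun p : Int × Char => p.1) := rfl
  rw [hmaps]
  congr 1
  apply List.filter_congr
  intro p _
  simp only [Function.comp_apply, beq_eq_beq]
  exact single_injective.eq_iff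

-- ===== VERDICT (by name: the statement is the Claim_ definition above) =====
theorem map_letters_spec : Claim_equal_map_letters := by
  intro word _
  unfold Spec_map_letters map_letters map_letters_alt
  by_cases h : word = ""
  · subst h; rfl
  · rw [if_neg h, sorted_ofList_index word.toList, mapA_items, mapB_items]
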